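-- pv_equiv track=rewrite | github.com/NihalSayyad/DSA | 03.Stack/03.zeros_ones.py | solve
-- ===== SOURCE A (Python) =====
-- def solve(A):
--     temp_dict = {}
--     temp_dict['1'] = 0
--     temp_dict['0'] = 0
--     counter = 0
--
--     for i in A:
--         temp_dict[i] += 1
--         if temp_dict['1'] != 0 and temp_dict['0'] != 0 and temp_dict['1'] == temp_dict['0']:
--             counter +=1
--             temp_dict['1'] = 0
--             temp_dict['0'] = 0
--
--     return counter
-- ===== SOURCE B (Python) =====
-- def solve(A):
--     prefix = []
--     total = 0
--     for i in A:
--         total += {'0': 1, '1': -1}[i]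
--         prefix.append(total)
--     return prefix.count(0)
-- ===== Notes on version B (the rewrite author's own statement) =====
-- stated objective: alternative
-- what changed: Instead of simulating A's greedy scan with two dict counters that are reset at each balanced point, B materializes the whole list of running prefix balances and then obtains the answer as the number of zeros in that list via list.count, using the characterization 'balanced cut points = zeros of the prefix-sum sequence'.
import Mathlib
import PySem

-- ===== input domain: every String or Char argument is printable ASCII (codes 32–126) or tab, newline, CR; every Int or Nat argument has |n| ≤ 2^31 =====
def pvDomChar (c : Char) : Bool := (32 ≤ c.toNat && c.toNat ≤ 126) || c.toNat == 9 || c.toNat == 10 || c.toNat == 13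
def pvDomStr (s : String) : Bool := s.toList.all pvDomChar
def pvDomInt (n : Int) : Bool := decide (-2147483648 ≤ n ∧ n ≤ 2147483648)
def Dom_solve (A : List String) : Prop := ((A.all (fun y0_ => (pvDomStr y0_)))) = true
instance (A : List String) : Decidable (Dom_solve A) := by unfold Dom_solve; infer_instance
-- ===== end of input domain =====

-- B counts the zeros of the materialized prefix-balance list (list.count) instead of A's greedy
-- dict-with-reset simulation; objective: alternative. A raises KeyError off '0'/'1' (Pre_ excludes it).


-- ===== PORT A =====
-- one loop step of A; 'none' = the KeyError raised by 'temp_dict[i] += 1' on a missing key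
def solveStepA (st : Option (PySem.Dict String Int × Int)) (i : String) :
    Option (PySem.Dict String Int × Int) :=
  match st with
  | none => none
  | some (d, counter) =>
    match d.get? i with
    | none => none
    | some v =>
      let d := d.insert i (v + 1)
      if d.getD "1" 0 ≠ 0 ∧ d.getD "0" 0 ≠ 0 ∧ d.getD "1" 0 = d.getD "0" 0 then
        some ((d.insert "1" 0).insert "0" 0, counter + 1)
      else
        some (d, counter)

-- 'return counter' (the none branch is unreachable under Pre_solve: Python raises KeyError there)
def solveFinA (r : Option (PySem.Dict String Int × Int)) : Int :=
  match r with
  | some (_, counter) => counter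
  | none => 0

def solve (A : List String) : Int :=
  let d0 : PySem.Dict String Int := (PySem.Dict.empty.insert "1" 0).insert "0" 0
  solveFinA (A.foldl solveStepA (some (d0, 0)))

-- ===== PORT B =====
-- the loop body; 'none' = the KeyError raised by the mapping-table lookup on a missing key
def solveStepB (st : Option (Int × List Int)) (i : String) : Option (Int × List Int) :=
  match st with
  | none => none
  | some (total, prefx) =>
    match ((PySem.Dict.empty.insert "0" (1 : Int)).insert "1" (-1)).get? i with
    | none => none
    | some v => some (total + v, prefx ++ [total + v])

-- 'return prefix.count(0)' (the none branch is unreachable under Pre_solve: Python raises KeyError there)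
def solveFinB (r : Option (Int × List Int)) : Int :=
  match r with
  | some (_, prefx) => PySem.List.count prefx 0
  | none => 0

def solve_alt (A : List String) : Int :=
  solveFinB (A.foldl solveStepB (some (0, [])))

-- ===== PRECONDITION & SPEC =====
-- A raises KeyError on any element other than '0' or '1'; Pre_ excludes exactly those inputs.
def Pre_solve (A : List String) : Prop := ∀ s ∈ A, s = "0" ∨ s = "1"
instance (A : List String) : Decidable (Pre_solve A) := by unfold Pre_solve; infer_instance
def pvWitness_solve : List String := ["0", "1", "1", "0", "1", "0"]

def Spec_solve (A : List String) (out : Int) : Prop := out = solve_alt A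
instance (A : List String) (out : Int) : Decidable (Spec_solve A out) := by unfold Spec_solve; infer_instance

-- ===== CLAIM (what is proved, stated in full; the proofs are below) =====
def Claim_equal_solve : Prop := ∀ (A : List String), Dom_solve A → Pre_solve A → Spec_solve A (solve A)

-- ===== LEMMAS AND PROOFS =====

-- the prefix-balance values contributed by the remaining input, starting from balance b
def deltaB (i : String) : Int := if i == "0" then 1 else -1
def pfx (b : Int) : List String → List Int
  | [] => []
  | i :: r => (b + deltaB i) :: pfx (b + deltaB i) r

-- under Pre_, B's loop never raises and builds exactly acc ++ pfx b A
theorem foldl_solveStepB (A : List String) :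
    ∀ (b : Int) (acc : List Int), (∀ s ∈ A, s = "0" ∨ s = "1") →
      A.foldl solveStepB (some (b, acc)) = some ((A.foldl (fun t i => t + deltaB i) b), acc ++ pfx b A) := by
  induction A with
  | nil => intro b acc _; simp [pfx]
  | cons i rest ih =>
    intro b acc hpre
    have hi : i = "0" ∨ i = "1" := hpre i (List.mem_cons_self)
    have hpre' : ∀ s ∈ rest, s = "0" ∨ s = "1" := fun s hs => hpre s (List.mem_cons_of_mem _ hs)
    rcases hi with hi | hi <;> subst hi <;>
      simp [solveStepB, pfx, deltaB, ih _ _ hpre',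
        show ((PySem.Dict.empty.insert "0" (1 : Int)).insert "1" (-1)).get? "0" = some 1 from by decide,
        show ((PySem.Dict.empty.insert "0" (1 : Int)).insert "1" (-1)).get? "1" = some (-1) from by decide]

-- Loop invariant: with d holding counts c0 at "0" and c1 at "1" (both nonnegative),
-- and bal = c0 - c1 vanishing only when both counts are zero, A's loop returns
-- cnt plus the number of zeros among the remaining prefix balances.
theorem solve_loop_eq (A : List String) :
    ∀ (d : PySem.Dict String Int) (c0 c1 cnt bal : Int),
    (∀ s ∈ A, s = "0" ∨ s = "1") →
    d.get? "0" = some c0 → d.get? "1" = some c1 →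
    0 ≤ c0 → 0 ≤ c1 → bal = c0 - c1 → (bal = 0 → c0 = 0 ∧ c1 = 0) →
    solveFinA (A.foldl solveStepA (some (d, cnt))) = cnt + ((pfx bal A).count 0 : Int) := by
  induction A with
  | nil => intros; simp [pfx, solveFinA]
  | cons i rest ih =>
    intro d c0 c1 cnt bal hpre h0 h1 hc0 hc1 hbal hz
    have hi : i = "0" ∨ i = "1" := hpre i (List.mem_cons_self)
    have hpre' : ∀ s ∈ rest, s = "0" ∨ s = "1" := fun s hs => hpre s (List.mem_cons_of_mem _ hs)
    rcases hi with hi | hi <;> subst hi <;>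
      simp only [List.foldl_cons, solveStepA, pfx, deltaB, List.count_cons]
    · -- i = "0"
      rw [h0]
      have hg1 : ((d.insert "0" (c0 + 1)).getD "1" 0) = c1 := by
        rw [PySem.Dict.getD_eq_get?_getD, PySem.Dict.get?_insert_of_ne d (c0 + 1) (by decide), h1]; rfl
      have hg0 : ((d.insert "0" (c0 + 1)).getD "0" 0) = c0 + 1 := by
        rw [PySem.Dict.getD_eq_get?_getD, PySem.Dict.get?_insert_self]; rfl
      simp only [hg1, hg0]
      by_cases hb : bal + 1 = 0
      · have hcond : c1 ≠ 0 ∧ c0 + 1 ≠ 0 ∧ c1 = c0 + 1 := by omega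
        rw [if_pos hcond]
        have := ih ((((d.insert "0" (c0+1)).insert "1" 0).insert "0" 0)) 0 0 (cnt + 1) (bal + 1) hpre'
          (PySem.Dict.get?_insert_self _ _ _) (by
            rw [PySem.Dict.get?_insert_of_ne _ _ (by decide), PySem.Dict.get?_insert_self])
          le_rfl le_rfl (by omega) (fun _ => ⟨rfl, rfl⟩)
        rw [this]
        simp [hb]
        omega
      · have hcond : ¬ (c1 ≠ 0 ∧ c0 + 1 ≠ 0 ∧ c1 = c0 + 1) := by omega
        rw [if_neg hcond]
        have := ih (d.insert "0" (c0 + 1)) (c0 + 1) c1 cnt (bal + 1) hpre'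
          (PySem.Dict.get?_insert_self _ _ _) (by
            rw [PySem.Dict.get?_insert_of_ne d (c0 + 1) (by decide), h1])
          (by omega) hc1 (by omega) (by omega)
        rw [this]
        simp [hb]
    · -- i = "1"
      rw [h1]
      have hg1 : ((d.insert "1" (c1 + 1)).getD "1" 0) = c1 + 1 := by
        rw [PySem.Dict.getD_eq_get?_getD, PySem.Dict.get?_insert_self]; rfl
      have hg0 : ((d.insert "1" (c1 + 1)).getD "0" 0) = c0 := by
        rw [PySem.Dict.getD_eq_get?_getD, PySem.Dict.get?_insert_of_ne d (c1 + 1) (by decide), h0]; rfl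
      simp only [hg1, hg0]
      by_cases hb : bal + -1 = 0
      · have hcond : c1 + 1 ≠ 0 ∧ c0 ≠ 0 ∧ c1 + 1 = c0 := by omega
        rw [if_pos hcond]
        have := ih ((((d.insert "1" (c1+1)).insert "1" 0).insert "0" 0)) 0 0 (cnt + 1) (bal + -1) hpre'
          (PySem.Dict.get?_insert_self _ _ _) (by
            rw [PySem.Dict.get?_insert_of_ne _ _ (by decide), PySem.Dict.get?_insert_self])
          le_rfl le_rfl (by omega) (fun _ => ⟨rfl, rfl⟩)
        rw [this]
        simp [hb]
        omega
      · have hcond : ¬ (c1 + 1 ≠ 0 ∧ c0 ≠ 0 ∧ c1 + 1 = c0) := by omega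
        rw [if_neg hcond]
        have := ih (d.insert "1" (c1 + 1)) c0 (c1 + 1) cnt (bal + -1) hpre'
          (by rw [PySem.Dict.get?_insert_of_ne d (c1 + 1) (by decide), h0])
          (PySem.Dict.get?_insert_self _ _ _)
          hc0 (by omega) (by omega) (by omega)
        rw [this]
        simp [hb]

-- ===== VERDICT (by name: the statement is the Claim_ definition above) =====
theorem solve_spec : Claim_equal_solve := by
  intro A _ hpre
  have hA := solve_loop_eq A ((PySem.Dict.empty.insert "1" 0).insert "0" 0) 0 0 0 0 hpre
    (by decide) (by decide) le_rfl le_rfl rfl (fun _ => ⟨rfl, rfl⟩)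
  show solve A = solve_alt A
  rw [solve, hA, solve_alt, foldl_solveStepB A 0 [] hpre]
  simp [solveFinB, PySem.List.count_eq]
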